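-- pv_equiv track=rewrite | github.com/awjck/Mastermind | modules/ai_gameplay.py | making_first_guess
-- ===== SOURCE A (Python) =====
-- def making_first_guess(n: int) -> list[int]:
--     '''
--     This function creates the first, most optimal guess for the game in order to provide inital data for minimax alogirthm.
--     The most optimal guess is to double every number starting from 1, depending on how many numbers are in the sequence.
--
--     Args:
--         n: length of the hidden sequence
--
--     Returns:
--         guess: generated guess
--
--     '''
--     guess = []
--     # Pivot says, how many 'doubled' numbers should be in the guess
--     pivot = n // 2
--
--     for i in range(1, pivot + 1):
--         guess.extend([i, i])
--
--     # Case, where n length is odd; we add one non-doubled number, in order to match the length of the hidden sequence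
--     if n % 2 != 0:
--         guess.append(pivot + 1)
--
--     return guess
-- ===== SOURCE B (Python) =====
-- def making_first_guess(n: int) -> list[int]:
--     # The k-th element (0-indexed) of the optimal first guess is always k//2 + 1:
--     # one index-driven pass, no pivot, no pair extension, no odd/even branch.
--     return [i // 2 + 1 for i in range(n)]
-- ===== Notes on version B (the rewrite author's own statement) =====
-- stated objective: simpler
-- what changed: Replaces the pivot computation, the pair-extending loop and the odd-length branch by a single index pass over range(n) emitting floor(i/2)+1 for each position.
-- intended difference: For negative odd n A returns a spurious singleton guess ([0] at the witness n=-1), while B returns the empty guess, the intended result for a nonpositive sequence length. — e.g. on making_first_guess(-1): A returns [0], B returns []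
import Mathlib
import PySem

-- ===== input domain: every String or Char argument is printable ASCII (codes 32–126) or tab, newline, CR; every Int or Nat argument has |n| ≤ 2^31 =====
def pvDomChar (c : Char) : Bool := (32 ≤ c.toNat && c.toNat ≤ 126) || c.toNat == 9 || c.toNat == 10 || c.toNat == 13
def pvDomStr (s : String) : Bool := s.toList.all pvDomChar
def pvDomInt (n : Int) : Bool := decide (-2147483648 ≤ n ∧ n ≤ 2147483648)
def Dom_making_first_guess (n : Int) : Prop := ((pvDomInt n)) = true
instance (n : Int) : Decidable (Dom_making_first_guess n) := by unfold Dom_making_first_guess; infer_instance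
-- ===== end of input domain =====

-- B replaces A's pair-building loop plus odd-length branch by one index pass emitting i//2+1; objective: simpler.

-- ===== PORT A =====
def making_first_guess (n : Int) : List Int :=
  let pivot := PySem.Int.floordiv n 2
  let guess := (PySem.List.pyRange 1 (pivot + 1) 1).foldl (fun g i => g ++ [i, i]) []
  if PySem.Int.mod n 2 ≠ 0 then guess ++ [pivot + 1] else guess

-- ===== PORT B =====
def making_first_guess_alt (n : Int) : List Int :=
  (PySem.List.pyRange 0 n 1).map (fun i => PySem.Int.floordiv i 2 + 1)

-- ===== PRECONDITION & SPEC =====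
-- For negative odd n (a nonsensical sequence length) A returns a spurious one-element list
-- such as [0] for n = -1, while B returns the empty guess [], the intended result for a
-- nonpositive length.
def D_making_first_guess (n : Int) : Prop := n < 0 ∧ n % 2 ≠ 0
instance (n : Int) : Decidable (D_making_first_guess n) := by unfold D_making_first_guess; infer_instance
def Spec_making_first_guess (n : Int) (out : List Int) : Prop := ¬ D_making_first_guess n → out = making_first_guess_alt n
instance (n : Int) (out : List Int) : Decidable (Spec_making_first_guess n out) := by unfold Spec_making_first_guess; infer_instance
def pvDiffWitness_making_first_guess : Int := (-1)
def pvDiffWitnessOut_making_first_guess : (List Int) × (List Int) := ([0], [])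

-- ===== CLAIM (what is proved, stated in full; the proofs are below) =====
def Claim_unchanged_making_first_guess : Prop := ∀ (n : Int), Dom_making_first_guess n → Spec_making_first_guess n (making_first_guess n)
def Claim_changed_making_first_guess : Prop := Dom_making_first_guess (pvDiffWitness_making_first_guess) ∧ D_making_first_guess (pvDiffWitness_making_first_guess) ∧ making_first_guess (pvDiffWitness_making_first_guess) = pvDiffWitnessOut_making_first_guess.1 ∧ making_first_guess_alt (pvDiffWitness_making_first_guess) = pvDiffWitnessOut_making_first_guess.2 ∧ pvDiffWitnessOut_making_first_guess.1 ≠ pvDiffWitnessOut_making_first_guess.2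
def Claim_exact_making_first_guess : Prop := ∀ (n : Int), Dom_making_first_guess n → D_making_first_guess n → making_first_guess n ≠ making_first_guess_alt n

-- ===== LEMMAS AND PROOFS =====

-- range(1, p+1) in Int equals 1-shifted List.range p
lemma pyRange_one_shift (p : Nat) :
    PySem.List.pyRange 1 ((p : Int) + 1) 1 = (List.range p).map (fun k => (k : Int) + 1) := by
  induction p with
  | zero => simp [PySem.List.pyRange_one_eq_nil]
  | succ p ih =>
    have h : (1 : Int) ≤ (p : Int) + 1 := by omega
    have := PySem.List.pyRange_one_succ_right (a := 1) (b := (p : Int) + 1) h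
    push_cast
    push_cast at ih this
    rw [show ((p : Int) + 1 + 1) = ((p : Int) + 1) + 1 by ring] at *
    rw [this, ih, List.range_succ]
    simp

-- core combinatorial identity over Nat
lemma core (m : Nat) :
    (List.range m).map (fun k => ((k / 2 : Nat) : Int) + 1)
      = (List.range (m / 2)).flatMap (fun k => [(k : Int) + 1, (k : Int) + 1])
        ++ (if m % 2 ≠ 0 then [((m / 2 : Nat) : Int) + 1] else []) := by
  induction m with
  | zero => simp
  | succ m ih =>
    rw [List.range_succ, List.map_append, ih]
    rcases Nat.mod_two_eq_zero_or_one m with hm | hmo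
    · have h2 : (m + 1) / 2 = m / 2 := by omega
      have hm1 : (m + 1) % 2 = 1 := by omega
      simp [h2, hm, hm1]
    · have h2 : (m + 1) / 2 = m / 2 + 1 := by omega
      have hm1 : (m + 1) % 2 = 0 := by omega
      simp [h2, hmo, hm1, List.range_succ, List.flatMap_append]

lemma alt_nat (m : Nat) :
    making_first_guess_alt (m : Int) = (List.range m).map (fun k => ((k / 2 : Nat) : Int) + 1) := by
  unfold making_first_guess_alt
  rw [PySem.List.pyRange_zero_natCast]
  simp [Function.comp]

lemma a_nat (m : Nat) :
    making_first_guess (m : Int) = making_first_guess_alt (m : Int) := by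
  unfold making_first_guess
  rw [alt_nat, core]
  have hpiv : PySem.Int.floordiv (m : Int) 2 = ((m / 2 : Nat) : Int) := by
    exact_mod_cast PySem.Int.floordiv_natCast m 2
  have hmod : PySem.Int.mod (m : Int) 2 = ((m % 2 : Nat) : Int) := by
    exact_mod_cast PySem.Int.mod_natCast m 2
  simp only [hpiv, hmod, pyRange_one_shift, PySem.List.foldl_append_eq_flatMap]
  by_cases h : m % 2 = 0
  · simp [h, List.flatMap_map]
  · have h1 : m % 2 = 1 := by omega
    simp [h1, List.flatMap_map]

-- ===== VERDICT (by name: the statement is the Claim_ definition above) =====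
theorem making_first_guess_spec : Claim_unchanged_making_first_guess := by
  intro n _ hnD
  rcases le_or_gt 0 n with hn | hn
  · obtain ⟨m, rfl⟩ := Int.eq_ofNat_of_zero_le hn
    exact a_nat m
  · -- negative n: not in D_, so n is even; both sides are []
    have heven : n % 2 = 0 := by
      by_contra h
      exact hnD ⟨hn, h⟩
    have hpiv : PySem.Int.floordiv n 2 + 1 ≤ 1 := by
      have := PySem.Int.floordiv_mul_add_mod n 2
      have hm : PySem.Int.mod n 2 = 0 := by
        rw [PySem.Int.mod_eq_emod_of_pos (by omega)]; exact heven
      omega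
    simp only [making_first_guess, making_first_guess_alt]
    rw [PySem.List.pyRange_one_eq_nil hpiv, PySem.List.pyRange_one_eq_nil (by omega : n ≤ 0)]
    have hm : PySem.Int.mod n 2 = 0 := by
      rw [PySem.Int.mod_eq_emod_of_pos (by omega)]; exact heven
    simp [heven]

theorem making_first_guess_changed : Claim_changed_making_first_guess := by
  unfold Claim_changed_making_first_guess; decide

theorem making_first_guess_tight : Claim_exact_making_first_guess := by
  intro n _ hD h
  rcases hD with ⟨hn, hodd⟩
  have halt : making_first_guess_alt n = [] := by
    unfold making_first_guess_alt
    rw [PySem.List.pyRange_one_eq_nil (by omega : n ≤ 0)]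
    rfl
  have hm : PySem.Int.mod n 2 ≠ 0 := by
    rw [PySem.Int.mod_eq_emod_of_pos (by omega)]; exact hodd
  have h1 : n % 2 = 1 := by omega
  have ha : making_first_guess n ≠ [] := by
    simp [making_first_guess, h1]
  exact ha (h.trans halt)
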